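-- pv_equiv track=rewrite | github.com/spacesaicodes1234/olympai_DHProdcutions | project/app.py | generate_health_tips
-- ===== SOURCE A (Python) =====
-- def generate_health_tips(text, summary):
--     text_lower = text.lower()
--     summary_lower = summary.lower()
--     tips = []
--
--     # Diabetes / Blood Sugar
--     if any(k in text_lower for k in ["diabetes", "hba1c", "glucose", "blood sugar", "dm ", "t2dm"]):
--         if any(k in text_lower for k in [">7", ">8", ">9", "high glucose", "poor control"]):
--             tips.append("Monitor blood sugar regularly • Aim for HbA1c <7% • Consider low-carb meals • Walk 30 min daily")
--         else:
--             tips.append("Great job keeping diabetes controlled! • Continue healthy diet • Stay active lifestyle")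
--
--     # Hypertension
--     if any(k in text_lower for k in ["hypertension", "high blood pressure", "bp ", "htn"]):
--         if any(k in text_lower for k in [">140", ">150", ">160", "uncontrolled"]):
--             tips.append("Reduce salt intake (<2g/day) • Exercise 150 min/week • Practice stress relief (meditation, sleep)")
--         else:
--             tips.append("Blood pressure well managed • Keep up the great work!")
--
--     # Cholesterol / Lipids
--     if any(k in text_lower for k in ["cholesterol", "ldl", "hdl", "triglyceride", "dyslipidemia"]):
--         if any(k in text_lower for k in ["high ldl", "elevated cholesterol", ">200", ">240"]):
--             tips.append("Eat more fiber (oats, vegetables) • Include healthy fats (nuts, olive oil, fish) • Avoid trans fats")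
--         else:
--             tips.append("Excellent lipid profile • Maintain heart-healthy habits")
--
--     # Obesity / Weight
--     if any(k in text_lower for k in ["obese", "bmi >30", "overweight", "weight concern"]):
--         tips.append("Focus on sustainable weight loss (0.5–1 kg/week) • Combine diet + exercise • Consider consulting a dietitian")
--
--     # Thyroid
--     if "thyroid" in text_lower:
--         if "hypothyroid" in text_lower or "tsh high" in text_lower:
--             tips.append("Take thyroid medication on empty stomach • Avoid soy/goitrogens near dose time")
--         elif "hyperthyroid" in text_lower:
--             tips.append("Stay hydrated • Avoid iodine excess • Follow up regularly")
--
--     # Anemia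
--     if any(k in text_lower for k in ["anemia", "low hemoglobin", "hb <", "iron deficiency"]):
--         tips.append("Include iron-rich foods: spinach, red meat, lentils • Pair with vitamin C for absorption • Avoid tea/coffee with meals")
--
--     # General wellness (always add)
--     tips.append("Stay hydrated (2–3L water/day) • Sleep 7–9 hours • Move every hour • Annual health checkups")
--
--     return tips[:5]  # Limit to top 5 most relevant
-- ===== SOURCE B (Python) =====
-- # Two-phase multi-pattern rewrite: one left-to-right sweep over the lowered text collects every
-- # matched keyword into a set; the tips are then resolved from a declarative rule table by pure
-- # set membership, with no further text scanning.
--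
-- _WELLNESS = "Stay hydrated (2\u20133L water/day) \u2022 Sleep 7\u20139 hours \u2022 Move every hour \u2022 Annual health checkups"
--
-- # (trigger keywords, alternatives); an alternative with an empty condition list is a default,
-- # a rule with no default (thyroid) adds nothing when only its trigger matches.
-- _RULES = [
--     (["diabetes", "hba1c", "glucose", "blood sugar", "dm ", "t2dm"],
--      [([">7", ">8", ">9", "high glucose", "poor control"],
--        "Monitor blood sugar regularly \u2022 Aim for HbA1c <7% \u2022 Consider low-carb meals \u2022 Walk 30 min daily"),
--       ([],
--        "Great job keeping diabetes controlled! \u2022 Continue healthy diet \u2022 Stay active lifestyle")]),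
--     (["hypertension", "high blood pressure", "bp ", "htn"],
--      [([">140", ">150", ">160", "uncontrolled"],
--        "Reduce salt intake (<2g/day) \u2022 Exercise 150 min/week \u2022 Practice stress relief (meditation, sleep)"),
--       ([],
--        "Blood pressure well managed \u2022 Keep up the great work!")]),
--     (["cholesterol", "ldl", "hdl", "triglyceride", "dyslipidemia"],
--      [(["high ldl", "elevated cholesterol", ">200", ">240"],
--        "Eat more fiber (oats, vegetables) \u2022 Include healthy fats (nuts, olive oil, fish) \u2022 Avoid trans fats"),
--       ([],
--        "Excellent lipid profile \u2022 Maintain heart-healthy habits")]),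
--     (["obese", "bmi >30", "overweight", "weight concern"],
--      [([],
--        "Focus on sustainable weight loss (0.5\u20131 kg/week) \u2022 Combine diet + exercise \u2022 Consider consulting a dietitian")]),
--     (["thyroid"],
--      [(["hypothyroid", "tsh high"],
--        "Take thyroid medication on empty stomach \u2022 Avoid soy/goitrogens near dose time"),
--       (["hyperthyroid"],
--        "Stay hydrated \u2022 Avoid iodine excess \u2022 Follow up regularly")]),
--     (["anemia", "low hemoglobin", "hb <", "iron deficiency"],
--      [([],
--        "Include iron-rich foods: spinach, red meat, lentils \u2022 Pair with vitamin C for absorption \u2022 Avoid tea/coffee with meals")]),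
-- ]
--
-- _KEYWORDS = [k for trig, alts in _RULES for k in trig] + \
--             [k for _, alts in _RULES for conds, _ in alts for k in conds]
--
--
-- def generate_health_tips(text, summary):
--     t = text.lower()
--     # phase 1: one sweep over the text, matching every keyword at every position
--     found = set()
--     for i in range(len(t)):
--         for k in _KEYWORDS:
--             if k not in found and t[i:i + len(k)] == k:
--                 found.add(k)
--     # phase 2: resolve the rule table purely by set membership
--     tips = []
--     for triggers, alts in _RULES:
--         if any(k in found for k in triggers):
--             for conds, tip in alts:
--                 if not conds or any(k in found for k in conds):
--                     tips.append(tip)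
--                     break
--     tips.append(_WELLNESS)
--     return tips[:5]
-- ===== Notes on version B (the rewrite author's own statement) =====
-- stated objective: alternative
-- what changed: Replaces A's per-category independent substring searches with a two-phase multi-pattern matcher: one left-to-right sweep over the lowered text tests every keyword at each position and collects the matches into a set, then a declarative rule table is resolved purely by set membership with no further text scanning.
import Mathlib
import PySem

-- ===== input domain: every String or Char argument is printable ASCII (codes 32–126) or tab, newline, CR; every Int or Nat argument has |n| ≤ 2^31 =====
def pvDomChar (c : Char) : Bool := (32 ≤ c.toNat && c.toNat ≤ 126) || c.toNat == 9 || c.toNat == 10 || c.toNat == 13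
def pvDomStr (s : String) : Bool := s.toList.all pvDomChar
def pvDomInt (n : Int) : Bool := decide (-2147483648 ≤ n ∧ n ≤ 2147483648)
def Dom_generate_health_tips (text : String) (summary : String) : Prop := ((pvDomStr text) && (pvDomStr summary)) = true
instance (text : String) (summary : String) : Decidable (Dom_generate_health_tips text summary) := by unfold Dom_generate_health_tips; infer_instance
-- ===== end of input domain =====

-- B replaces A's per-category repeated substring searches by one left-to-right sweep over the
-- text collecting every matched keyword into a set, followed by a rule-table resolution phase
-- that builds the tips purely from set membership (objective: alternative).

-- ===== PORT A =====
-- literal transliteration of A; tips[:5] on a list is List.take 5 (bound nonnegative, exact)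
def generate_health_tips (text : String) (summary : String) : List String :=
  -- summary_lower is computed by A and never used; kept for fidelity
  let text_lower := PySem.Str.lower text
  let _summary_lower := PySem.Str.lower summary
  let tips : List String := []
  let tips := if (["diabetes", "hba1c", "glucose", "blood sugar", "dm ", "t2dm"].any
      (fun k => PySem.Str.isIn k text_lower)) then
    (if ([">7", ">8", ">9", "high glucose", "poor control"].any
        (fun k => PySem.Str.isIn k text_lower)) then
      tips ++ ["Monitor blood sugar regularly • Aim for HbA1c <7% • Consider low-carb meals • Walk 30 min daily"]
    else
      tips ++ ["Great job keeping diabetes controlled! • Continue healthy diet • Stay active lifestyle"])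
  else tips
  let tips := if (["hypertension", "high blood pressure", "bp ", "htn"].any
      (fun k => PySem.Str.isIn k text_lower)) then
    (if ([">140", ">150", ">160", "uncontrolled"].any
        (fun k => PySem.Str.isIn k text_lower)) then
      tips ++ ["Reduce salt intake (<2g/day) • Exercise 150 min/week • Practice stress relief (meditation, sleep)"]
    else
      tips ++ ["Blood pressure well managed • Keep up the great work!"])
  else tips
  let tips := if (["cholesterol", "ldl", "hdl", "triglyceride", "dyslipidemia"].any
      (fun k => PySem.Str.isIn k text_lower)) then
    (if (["high ldl", "elevated cholesterol", ">200", ">240"].any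
        (fun k => PySem.Str.isIn k text_lower)) then
      tips ++ ["Eat more fiber (oats, vegetables) • Include healthy fats (nuts, olive oil, fish) • Avoid trans fats"]
    else
      tips ++ ["Excellent lipid profile • Maintain heart-healthy habits"])
  else tips
  let tips := if (["obese", "bmi >30", "overweight", "weight concern"].any
      (fun k => PySem.Str.isIn k text_lower)) then
    tips ++ ["Focus on sustainable weight loss (0.5–1 kg/week) • Combine diet + exercise • Consider consulting a dietitian"]
  else tips
  let tips := if PySem.Str.isIn "thyroid" text_lower then
    (if PySem.Str.isIn "hypothyroid" text_lower || PySem.Str.isIn "tsh high" text_lower then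
      tips ++ ["Take thyroid medication on empty stomach • Avoid soy/goitrogens near dose time"]
    else if PySem.Str.isIn "hyperthyroid" text_lower then
      tips ++ ["Stay hydrated • Avoid iodine excess • Follow up regularly"]
    else tips)
  else tips
  let tips := if (["anemia", "low hemoglobin", "hb <", "iron deficiency"].any
      (fun k => PySem.Str.isIn k text_lower)) then
    tips ++ ["Include iron-rich foods: spinach, red meat, lentils • Pair with vitamin C for absorption • Avoid tea/coffee with meals"]
  else tips
  let tips := tips ++ ["Stay hydrated (2–3L water/day) • Sleep 7–9 hours • Move every hour • Annual health checkups"]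
  tips.take 5

-- ===== PORT B =====
def pvWellness : String :=
  "Stay hydrated (2–3L water/day) • Sleep 7–9 hours • Move every hour • Annual health checkups"

def pvRules : List (List String × List (List String × String)) :=
  [ (["diabetes", "hba1c", "glucose", "blood sugar", "dm ", "t2dm"],
     [([">7", ">8", ">9", "high glucose", "poor control"],
       "Monitor blood sugar regularly • Aim for HbA1c <7% • Consider low-carb meals • Walk 30 min daily"),
      ([],
       "Great job keeping diabetes controlled! • Continue healthy diet • Stay active lifestyle")]),
    (["hypertension", "high blood pressure", "bp ", "htn"],
     [([">140", ">150", ">160", "uncontrolled"],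
       "Reduce salt intake (<2g/day) • Exercise 150 min/week • Practice stress relief (meditation, sleep)"),
      ([],
       "Blood pressure well managed • Keep up the great work!")]),
    (["cholesterol", "ldl", "hdl", "triglyceride", "dyslipidemia"],
     [(["high ldl", "elevated cholesterol", ">200", ">240"],
       "Eat more fiber (oats, vegetables) • Include healthy fats (nuts, olive oil, fish) • Avoid trans fats"),
      ([],
       "Excellent lipid profile • Maintain heart-healthy habits")]),
    (["obese", "bmi >30", "overweight", "weight concern"],
     [([],
       "Focus on sustainable weight loss (0.5–1 kg/week) • Combine diet + exercise • Consider consulting a dietitian")]),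
    (["thyroid"],
     [(["hypothyroid", "tsh high"],
       "Take thyroid medication on empty stomach • Avoid soy/goitrogens near dose time"),
      (["hyperthyroid"],
       "Stay hydrated • Avoid iodine excess • Follow up regularly")]),
    (["anemia", "low hemoglobin", "hb <", "iron deficiency"],
     [([],
       "Include iron-rich foods: spinach, red meat, lentils • Pair with vitamin C for absorption • Avoid tea/coffee with meals")]) ]

-- _KEYWORDS of Source B: all trigger keywords, then all condition keywords
def pvKeywords : List String :=
  pvRules.flatMap (fun r => r.1) ++ pvRules.flatMap (fun r => r.2.flatMap (fun a => a.1))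

-- phase 1 of Source B: for i in range(len(t)): for k in _KEYWORDS: if k not in found and t[i:i+len(k)] == k: found.add(k)
def pvScan (t : String) : PySem.Set String :=
  (PySem.List.pyRange 0 (PySem.Str.len t) 1).foldl (fun found i =>
    pvKeywords.foldl (fun f k =>
      if !(PySem.Set.contains f k) && (PySem.Str.slice t (some i) (some (i + PySem.Str.len k)) == k) then
        PySem.Set.add f k
      else f) found) PySem.Set.empty

-- phase 2 inner for/break: first alternative with an empty or matched condition list
def pvPickAlt (found : PySem.Set String) : List (List String × String) → Option String
  | [] => none
  | (conds, tip) :: rest =>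
    if conds.isEmpty || conds.any (fun k => PySem.Set.contains found k) then some tip
    else pvPickAlt found rest

-- appending the selected tip (if any) to the accumulator
def pvApplyAlt (tips : List String) : Option String → List String
  | some tip => tips ++ [tip]
  | none => tips

def generate_health_tips_alt (text : String) (summary : String) : List String :=
  let t := PySem.Str.lower text
  let found := pvScan t
  let tips := pvRules.foldl (fun tips rule =>
    if rule.1.any (fun k => PySem.Set.contains found k) then pvApplyAlt tips (pvPickAlt found rule.2)
    else tips) []
  (tips ++ [pvWellness]).take 5

-- ===== PRECONDITION & SPEC =====
def Spec_generate_health_tips (text : String) (summary : String) (out : List String) : Prop := out = generate_health_tips_alt text summary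
instance (text : String) (summary : String) (out : List String) : Decidable (Spec_generate_health_tips text summary out) := by unfold Spec_generate_health_tips; infer_instance

-- ===== CLAIM (what is proved, stated in full; the proofs are below) =====
def Claim_equal_generate_health_tips : Prop := ∀ (text : String) (summary : String), Dom_generate_health_tips text summary → Spec_generate_health_tips text summary (generate_health_tips text summary)

-- ===== LEMMAS AND PROOFS =====

-- the match test of the scan at one position
def pvMatch (t : String) (i : Int) (k : String) : Bool :=
  PySem.Str.slice t (some i) (some (i + PySem.Str.len k)) == k

-- membership after the inner keyword loop at one position
theorem pvMemInner (t : String) (i : Int) (x : String) :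
    ∀ (ks : List String) (found : PySem.Set String),
    (x ∈ ks.foldl (fun f k =>
        if !(PySem.Set.contains f k) && (PySem.Str.slice t (some i) (some (i + PySem.Str.len k)) == k) then
          PySem.Set.add f k else f) found
      ↔ x ∈ found ∨ (x ∈ ks ∧ pvMatch t i x = true)) := by
  intro ks
  induction ks with
  | nil => intro found; simp [List.foldl_nil]
  | cons k rest ih =>
    intro found
    rw [List.foldl_cons, ih, List.mem_cons]
    by_cases h : (!(PySem.Set.contains found k) && (PySem.Str.slice t (some i) (some (i + PySem.Str.len k)) == k)) = true
    · rw [if_pos h]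
      obtain ⟨_, hm⟩ := Bool.and_eq_true_iff.mp h
      rw [PySem.Set.mem_add]
      constructor
      · rintro ((hf | hx) | ⟨hr, hmx⟩)
        · exact Or.inl hf
        · subst hx; exact Or.inr ⟨Or.inl rfl, hm⟩
        · exact Or.inr ⟨Or.inr hr, hmx⟩
      · rintro (hf | ⟨hx | hr, hmx⟩)
        · exact Or.inl (Or.inl hf)
        · subst hx; exact Or.inl (Or.inr rfl)
        · exact Or.inr ⟨hr, hmx⟩
    · rw [if_neg h]
      constructor
      · rintro (hf | ⟨hr, hmx⟩)
        · exact Or.inl hf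
        · exact Or.inr ⟨Or.inr hr, hmx⟩
      · rintro (hf | ⟨hx | hr, hmx⟩)
        · exact Or.inl hf
        · subst hx
          by_cases hc : PySem.Set.contains found x = true
          · exact Or.inl ((PySem.Set.contains_iff found x).mp hc)
          · exact absurd (by
              rw [Bool.and_eq_true_iff]
              refine ⟨?_, by simpa [pvMatch] using hmx⟩
              rw [Bool.eq_false_iff.mpr hc]; rfl) h
        · exact Or.inr ⟨hr, hmx⟩

-- membership after the outer position loop
theorem pvMemOuter (t : String) (x : String) :
    ∀ (is : List Int) (found : PySem.Set String),
    (x ∈ is.foldl (fun found i =>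
        pvKeywords.foldl (fun f k =>
          if !(PySem.Set.contains f k) && (PySem.Str.slice t (some i) (some (i + PySem.Str.len k)) == k) then
            PySem.Set.add f k else f) found) found
      ↔ x ∈ found ∨ (x ∈ pvKeywords ∧ ∃ i ∈ is, pvMatch t i x = true)) := by
  intro is
  induction is with
  | nil => intro found; simp
  | cons i rest ih =>
    intro found
    simp only [List.foldl_cons, ih, pvMemInner, List.mem_cons]
    constructor
    · rintro ((h | ⟨hk, hm⟩) | ⟨hk, j, hj, hm⟩)
      · exact Or.inl h
      · exact Or.inr ⟨hk, i, Or.inl rfl, hm⟩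
      · exact Or.inr ⟨hk, j, Or.inr hj, hm⟩
    · rintro (h | ⟨hk, j, hj | hj, hm⟩)
      · exact Or.inl (Or.inl h)
      · subst hj; exact Or.inl (Or.inr ⟨hk, hm⟩)
      · exact Or.inr ⟨hk, j, hj, hm⟩

-- a keyword is in the scanned set exactly when it occurs in the text
theorem pvScanContains (t k : String) (hk : k ∈ pvKeywords) (hne : k.toList ≠ []) :
    PySem.Set.contains (pvScan t) k = PySem.Str.isIn k t := by
  rw [Bool.eq_iff_iff, PySem.Set.contains_iff]
  unfold pvScan
  rw [pvMemOuter]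
  have hmem : ∀ i : Int, (pvMatch t i k = true ∧ 0 ≤ i ∧ i < PySem.Str.len t) ↔
      ∃ j : Nat, (i = (j : Int)) ∧ k.toList <+: t.toList.drop j := by
    intro i
    constructor
    · rintro ⟨hm, h0, _⟩
      obtain ⟨j, hj⟩ : ∃ j : Nat, i = (j : Int) := ⟨i.toNat, (Int.toNat_of_nonneg h0).symm⟩
      subst hj
      refine ⟨_, rfl, ?_⟩
      have := (beq_iff_eq).mp hm
      have htl : (PySem.Str.slice t (some (j : Int)) (some ((j : Int) + PySem.Str.len k))).toList = k.toList := by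
        rw [this]
      rw [PySem.Str.toList_slice] at htl
      simp only [PySem.Chars.slice_eq_listSlice, PySem.Str.len_eq] at htl
      rw [PySem.List.slice_natCast_add] at htl
      rw [List.prefix_iff_eq_take]
      exact htl.symm
    · rintro ⟨j, rfl, hp⟩
      have hjlt : j < t.toList.length := by
        by_contra hge
        rw [not_lt] at hge
        rw [List.drop_eq_nil_of_le hge] at hp
        exact hne (List.prefix_nil.mp hp)
      refine ⟨?_, by positivity, ?_⟩
      · have : PySem.Str.slice t (some (j:Int)) (some ((j:Int) + PySem.Str.len k)) = k := by
          have htl : (PySem.Str.slice t (some (j:Int)) (some ((j:Int) + PySem.Str.len k))).toList = k.toList := by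
            rw [PySem.Str.toList_slice]
            simp only [PySem.Chars.slice_eq_listSlice, PySem.Str.len_eq]
            rw [PySem.List.slice_natCast_add]
            exact ((List.prefix_iff_eq_take).mp hp).symm
          exact String.toList_inj.mp htl
        simpa [pvMatch] using this
      · rw [PySem.Str.len_eq]; exact_mod_cast hjlt
  constructor
  · rintro (h | ⟨_, i, hi, hm⟩)
    · simp [PySem.Set.empty] at h
    · rw [PySem.List.mem_pyRange_one] at hi
      obtain ⟨j, _, hp⟩ := (hmem i).mp ⟨hm, hi.1, hi.2⟩
      rw [PySem.Str.isIn_eq]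
      exact (PySem.Chars.exists_prefix_drop_iff_isIn _ _).mp ⟨j, hp⟩
  · intro h
    rw [PySem.Str.isIn_eq] at h
    obtain ⟨j, hp⟩ := (PySem.Chars.exists_prefix_drop_iff_isIn _ _).mpr h
    obtain ⟨hm, h0, hlt⟩ := (hmem (j : Int)).mpr ⟨j, rfl, hp⟩
    exact Or.inr ⟨hk, (j : Int), PySem.List.mem_pyRange_one.mpr ⟨h0, hlt⟩, hm⟩

-- any-membership over the scanned set equals A's any-substring test, for keyword lists from the table
theorem pvAnyEq (t : String) (keys : List String)
    (h : ∀ k ∈ keys, k ∈ pvKeywords ∧ k.toList ≠ []) :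
    keys.any (fun k => PySem.Set.contains (pvScan t) k) = keys.any (fun k => PySem.Str.isIn k t) := by
  induction keys with
  | nil => rfl
  | cons k rest ih =>
    simp only [List.any_cons]
    rw [pvScanContains t k (h k (List.mem_cons_self)).1 (h k (List.mem_cons_self)).2,
      ih (fun x hx => h x (List.mem_cons_of_mem _ hx))]

-- a rule whose second alternative is a default picks x on a condition match, else y
theorem pvStep2 (found : PySem.Set String) (tips : List String) (k : String) (ks : List String) (x y : String) :
    pvApplyAlt tips (pvPickAlt found [(k :: ks, x), ([], y)])
      = if (k :: ks).any (fun s => PySem.Set.contains found s) then tips ++ [x] else tips ++ [y] := by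
  cases h : (k :: ks).any (fun s => PySem.Set.contains found s) <;>
    simp only [pvPickAlt, pvApplyAlt, List.isEmpty, Bool.false_or, Bool.true_or, h,
      if_true, if_false, Bool.false_eq_true]

-- a rule with a single default alternative always appends its tip
theorem pvStep1 (found : PySem.Set String) (tips : List String) (x : String) :
    pvApplyAlt tips (pvPickAlt found [([], x)]) = tips ++ [x] := by
  simp only [pvPickAlt, pvApplyAlt, List.isEmpty, Bool.true_or, if_true]

-- a rule with two conditional alternatives and no default may append nothing
theorem pvStepT (found : PySem.Set String) (tips : List String) (k₁ : String) (ks₁ : List String)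
    (k₂ : String) (ks₂ : List String) (x y : String) :
    pvApplyAlt tips (pvPickAlt found [(k₁ :: ks₁, x), (k₂ :: ks₂, y)])
      = if (k₁ :: ks₁).any (fun s => PySem.Set.contains found s) then tips ++ [x]
        else if (k₂ :: ks₂).any (fun s => PySem.Set.contains found s) then tips ++ [y]
        else tips := by
  cases h₁ : (k₁ :: ks₁).any (fun s => PySem.Set.contains found s) <;>
    cases h₂ : (k₂ :: ks₂).any (fun s => PySem.Set.contains found s) <;>
      simp only [pvPickAlt, pvApplyAlt, List.isEmpty, Bool.false_or, h₁, h₂,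
        if_true, if_false, Bool.false_eq_true]

-- ===== VERDICT (by name: the statement is the Claim_ definition above) =====
theorem generate_health_tips_spec : Claim_equal_generate_health_tips := by
  intro text summary _
  simp only [Spec_generate_health_tips, generate_health_tips, generate_health_tips_alt]
  simp only [pvRules, pvWellness, List.foldl, pvStep2, pvStep1, pvStepT]
  rw [pvAnyEq _ ["diabetes", "hba1c", "glucose", "blood sugar", "dm ", "t2dm"] (by decide),
    pvAnyEq _ [">7", ">8", ">9", "high glucose", "poor control"] (by decide),
    pvAnyEq _ ["hypertension", "high blood pressure", "bp ", "htn"] (by decide),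
    pvAnyEq _ [">140", ">150", ">160", "uncontrolled"] (by decide),
    pvAnyEq _ ["cholesterol", "ldl", "hdl", "triglyceride", "dyslipidemia"] (by decide),
    pvAnyEq _ ["high ldl", "elevated cholesterol", ">200", ">240"] (by decide),
    pvAnyEq _ ["obese", "bmi >30", "overweight", "weight concern"] (by decide),
    pvAnyEq _ ["thyroid"] (by decide),
    pvAnyEq _ ["hypothyroid", "tsh high"] (by decide),
    pvAnyEq _ ["hyperthyroid"] (by decide),
    pvAnyEq _ ["anemia", "low hemoglobin", "hb <", "iron deficiency"] (by decide)]
  simp only [List.any_cons, List.any_nil, Bool.or_false]
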